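/-
  SEGMENT C8 OF `start_decoder` (0x1146f5–0x11471e + 0x1149f3–0x114b7a; stb_vorbis_fixed.c 3851–3868; 90 instructions) SPLIT IN SIX at
  the returns of its contract calls and at the join of line 3864.

      if (c->sorted_entries) {                                        0x1146f5  check load4 c+840H ; eax = SE ; test ; jne 0x1149f3   (else 0x114710)
         c->sorted_codewords = setup_malloc(f, 4·(SE+1));             0x1149f3  esi = 4·eax+4 ; rdi = [rsp+18H] ; call setup_malloc → cut138 = 0x114a04
         if (!c->sorted_codewords) return error(f, VORBIS_outofmem);  0x114a04  rbp = rax ; check store8 c+830H ; [r14+830H] = rbp ; test ; je 0x114ac9 (stub)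
         c->sorted_values = setup_malloc(f, 4·(SE+1));                0x114a23  check load4 ; esi = 4·SE+4 ; call setup_malloc → cut139 = 0x114a47
         if (!c->sorted_values) return error(f, VORBIS_outofmem);     0x114a47  rbp = rax ; check store8 c+838H ; [r14+838H] = rbp ; test ; je 0x114ae0 (stub)
         memset(c->sorted_values, 0, 4·(SE+1));         /* FIX 7 */   0x114a62  check load4 ; rdx = sext(SE+1)·4 ; esi = 0 ; rdi = rbp ; call memset → cut140 = 0x114a8c
         ++c->sorted_values;                                          0x114a8c  check load8 c+838H ; rdi = [r14+838H] ; rbp = rdi+4 ; [r14+838H] = rbp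
         c->sorted_values[-1] = -1;                                   0x114aaa  check store4 (rdi = the block's base) ; dword [rbp−4] = −1
         compute_sorted_huffman(c, lengths, values);                  0x114ab6  rdx = r12 ; rsi = rbx ; rdi = r14 ; call ; 0x114ac4 jmp 0x114710
      }
      if (c->sparse) {                                                0x114710  check load1 c+1BH ; cmp byte [r14+1BH],0 ; jne 0x114af7   (else 0x114724 = `AtC9`)
         setup_temp_free(f, values, 4·SE);                            0x114af7  rbp = c+840H ; check load4 ; edx = 4·SE ; rsi = r12 ; r15 = [rsp+18H] ; call → cut144 = 0x114b24
         setup_temp_free(f, c->codewords, 4·SE);                      0x114b24  check load4 (rdi = rbp) ; ebp = SE ; r12 = c+28H ; check load8 ; rsi = [r14+28H] ; call → cut145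
         setup_temp_free(f, lengths, c->entries);                     0x114b52  check load4 c+4 ; edx = E ; rsi = rbx ; rdi = r15 ; call → cut146
         c->codewords = NULL;                                         0x114b6a  check store8 (rdi = r12) ; qword [r14+28H] = 0 ; jmp 0x114724 = `AtC9`
      }

      StartDecoder.Core8          `Built` WITHOUT `fresh : Fresh5` (the store 0x114a13 breaks it before the NULL test), with the ages of the
                                  two tables of K3 stated against a NEW snapshot `Ab` = the arena at `AtC8` (before the first setup_malloc)
      StartDecoder.In8M           `Frame` at a cut + `Core8` + VAL + `1 ≤ SE`: the common part at cut138, cut139, cut140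
      StartDecoder.At8M1 / At8M2 / At8M3     the three stages (results of the allocator, the two pointers, the zero fill); `Ac` = the arena
                                  between the two setup_malloc calls
      StartDecoder.In8S / At8S    the join 0x114710 (`L.start_decoder.at_114710`): `Core8` + K4 + K4c
      StartDecoder.In8F / At8F    cut144, after the first setup_temp_free of a sparse book: `InC9`'s clauses, temps = [P2, P1]
      StartDecoder.SegC8a … SegC8f           the six child claims
      StartDecoder.SegC8.of_parts            SegC8a → … → SegC8f → SegC8 (`ReachVia.trans`, no machine step; the claim `SegC8` of
                                  Vorbis/Spec/StartDecoderA.lean is unchanged)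

  WHY THE SNAPSHOTS `Ab`, `Ac` (they are what this split adds to the plan): compute_sorted_huffman's precondition asks the blocks
  `codeword_lengths`, `codewords`, `sorted_codewords`, `sorted_values − 4` to be PAIRWISE DISJOINT (`SortedHuffmanPre.apartDense` /
  `.apartSparse`). Two blocks of the arena are disjoint when they are DIFFERENT blocks (`arena_disjoint`), and the family tells blocks
  apart by their AGES (`Since.ne_old`, `Since.ne_since`, `ArenaOK.old_disjoint_since`, `.since_disjoint_since`). `Built` says only
  "allocated since `Aw`" of `codewords` / `codeword_lengths`; the same of the two new tables would not separate the four. So: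
  `codewords` (dense) / `codeword_lengths` (sparse) are `Since Aw Ab`, `sorted_codewords` is `Since Ab Ac`, the `sorted_values` block is
  `Since Ac A.1`, with `Aw ⊑ Ab ⊑ Ac ⊑ A.1`. `Built`'s own texts (`Since Aw A.1`) come back by `Since.mono`.
-/
import Vorbis.LabelsAt
import Vorbis.Spec.StartDecoderA
import Vorbis.Spec.StartDecoderCarry
import Vorbis.Spec.StartDecoderC7
namespace Vorbis.Spec.StartDecoder
open X86 X86.User Asan

/-- **`Built` without its clause `fresh : Fresh5`, with the snapshot `Ab`** (the arena at `AtC8`, before the sorted tables are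
allocated): what every cut of C8 between `AtC8` and the frees carries of the book under construction. The fields are `Built`'s texts;
the three blocks that `Built` dates "since `Aw`" are dated `Since Aw Ab` here (they exist at `AtC8` already), so that the tables
allocated by C8 (`Since Ab …`) are different blocks. `fresh` is `Fresh3`: `sorted_codewords` / `sorted_values` are what C8 writes. -/
structure Core8 (g : Ghost) (i : Nat) (A2 A3 Ai Aw Ab : Arena) (A : Arena × List Obj) (lengths values : Nat) (v : State) :
    Prop where
  /-- CUR(i): slot `[R+18H]` = f, r14 = c, the arena, the finished books -/
  cur : Cur g i A2 A3 Ai A v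
  /-- `Aw` (the arena at `AtC6`) lies after the head of the iteration -/
  extw : Ai.Extends Aw
  /-- `Ab` (the arena at `AtC8`) lies after `Aw` -/
  extb : Aw.Extends Ab
  /-- … and before now -/
  extb' : Ab.Extends A.1
  k1 : Codebook.K1 v.mem (g.cb v.mem i)
  k2 : Codebook.K2 v.mem (g.cb v.mem i)
  /-- rbx = lengths (callee-saved; read 0x114ab9, 0x114b5f) -/
  rbx : v.reg .rbx = addr lengths
  /-- r12 = values (callee-saved; read 0x114ab6, 0x114b14; overwritten 0x114b33) -/
  r12 : v.reg .r12 = addr values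
  lenL : LenL v.mem lengths (Codebook.entries v.mem (g.cb v.mem i)).toNat
  dense_values : Codebook.sparse v.mem (g.cb v.mem i) = 0 → values = 0
  /-- K3n, `codeword_lengths`: allocated between `Ai` and `Aw` -/
  dense_lengths : Codebook.sparse v.mem (g.cb v.mem i) = 0 →
    Since Ai Aw ⟨Codebook.codeword_lengths v.mem (g.cb v.mem i), (Codebook.entries v.mem (g.cb v.mem i)).toNat⟩
  /-- K3n, `codewords`: allocated between `Aw` and `Ab` (`Built.dense_codewords` at `AtC8`) -/
  dense_codewords : Codebook.sparse v.mem (g.cb v.mem i) = 0 →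
    Since Aw Ab ⟨Codebook.codewords v.mem (g.cb v.mem i), 4 * (Codebook.entries v.mem (g.cb v.mem i)).toNat⟩
  dense_eq : Codebook.sparse v.mem (g.cb v.mem i) = 0 → lengths = Codebook.codeword_lengths v.mem (g.cb v.mem i)
  dense_temps : Codebook.sparse v.mem (g.cb v.mem i) = 0 → A.1.temps = []
  dense_cnt : Codebook.sparse v.mem (g.cb v.mem i) = 0 → CNT' v.mem lengths (g.cb v.mem i)
  /-- the final `codeword_lengths` block of a sparse book: allocated between `Aw` and `Ab` (`Built.sparse_lengths` at `AtC8`) -/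
  sparse_lengths : Codebook.sparse v.mem (g.cb v.mem i) = 1 →
    Since Aw Ab ⟨Codebook.codeword_lengths v.mem (g.cb v.mem i), (Codebook.sorted_entries v.mem (g.cb v.mem i)).toNat⟩
  /-- temps = [P3, P2, P1] (setup_malloc does not touch the temp end of the arena) -/
  sparse_temps : Codebook.sparse v.mem (g.cb v.mem i) = 1 →
    TempsAre A.1
      [(values, 4 * (Codebook.sorted_entries v.mem (g.cb v.mem i)).toNat),
       (Codebook.codewords v.mem (g.cb v.mem i), 4 * (Codebook.sorted_entries v.mem (g.cb v.mem i)).toNat),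
       (lengths, (Codebook.entries v.mem (g.cb v.mem i)).toNat)]
  sparse_cnt : Codebook.sparse v.mem (g.cb v.mem i) = 1 → CNT v.mem lengths (g.cb v.mem i)
  /-- c fresh at {LT, LV, MU} -/
  fresh : Fresh3 v.mem (g.cb v.mem i)

namespace C8

/-- **`Core8` at `AtC8`**: `Built` for the arena `A` gives `Core8` with the snapshot `Ab := A.1` (nothing allocated since). How C8a
starts, on both of its ways. -/
theorem core_of_built {g : Ghost} {i : Nat} {A2 A3 Ai Aw : Arena} {A : Arena × List Obj} {lengths values : Nat} {v : State}
    (h : Built g i A2 A3 Ai Aw A lengths values v) : Core8 g i A2 A3 Ai Aw A.1 A lengths values v :=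
  { cur := h.cur
    extw := h.extw
    extb := h.extw'
    extb' := Arena.Extends.refl A.1
    k1 := h.k1
    k2 := h.k2
    rbx := h.rbx
    r12 := h.r12
    lenL := h.lenL
    dense_values := h.dense_values
    dense_lengths := h.dense_lengths
    dense_codewords := h.dense_codewords
    dense_eq := h.dense_eq
    dense_temps := h.dense_temps
    dense_cnt := h.dense_cnt
    sparse_lengths := h.sparse_lengths
    sparse_temps := h.sparse_temps
    sparse_cnt := h.sparse_cnt
    fresh := h.fresh.toFresh3 }

/-- `Aw` lies before now (`Built.extw'`). -/
theorem core_extw' {g : Ghost} {i : Nat} {A2 A3 Ai Aw Ab : Arena} {A : Arena × List Obj} {lengths values : Nat} {v : State}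
    (h : Core8 g i A2 A3 Ai Aw Ab A lengths values v) : Aw.Extends A.1 :=
  h.extb.trans h.extb'

/-- **K3 of `AtC9` for a dense book, from `Core8`** (the exit of C8e when `c->sparse = 0`): both blocks were allocated since `Ai` and
are blocks of the present arena; the sparse shape is not asked. -/
theorem core_k3_dense {g : Ghost} {i : Nat} {A2 A3 Ai Aw Ab : Arena} {A : Arena × List Obj} {lengths values : Nat} {v : State}
    (h : Core8 g i A2 A3 Ai Aw Ab A lengths values v) (h0 : Codebook.sparse v.mem (g.cb v.mem i) = 0) :
    Codebook.K3 (Since Ai A.1) v.mem (g.cb v.mem i) := by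
  constructor
  · intro _
    constructor
    · exact (h.dense_lengths h0).mono (core_extw' h)
    · exact ((h.dense_codewords h0).older h.extw).mono h.extb'
  · intro h1
    rw [h0] at h1
    exact absurd h1 (by decide)

end C8

/-- **The common part at cut138 / cut139 / cut140** (`pc` a parameter: the returns of setup_malloc ×2 and of memset): `Frame` at the
cut, `Core8`, VAL of `AtC8` (read by compute_sorted_huffman's precondition `SortedHuffmanPre.sparse`), and `1 ≤ SE` (the `jne` of
0x11470a taken: `SortedHuffmanPre.se_pos`, the premises of K4, the size `4·(SE+1)` of both tables). -/
structure In8M (u₀ : State) (g : Ghost) (i : Nat) (A2 A3 Ai Aw Ab : Arena) (A : Arena × List Obj) (lengths values : Nat)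
    (pc : Word) (v : State) : Prop where
  /-- the common part at the cut -/
  frame : Frame u₀ g pc A v
  /-- the book under construction -/
  core : Core8 g i A2 A3 Ai Aw Ab A lengths values v
  /-- VAL: every `values[m]`, m < SE, is `< E` (`InC8.sparse_val`; the temp block P3 is not written before the call 0x114abf) -/
  sparse_val : Codebook.sparse v.mem (g.cb v.mem i) = 1 →
    VAL v.mem values (Codebook.sorted_entries v.mem (g.cb v.mem i)).toNat (Codebook.entries v.mem (g.cb v.mem i)).toNat
  /-- the segment is under `if (c->sorted_entries)` -/
  se_pos : 1 ≤ Codebook.sorted_entries v.mem (g.cb v.mem i)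

/-- **`At8M1 i`, cut138 = 0x114a04** (`mov rbp, rax`: the first `setup_malloc(f, 4·(SE+1))` returned; exit of `C8a`, entry of `C8b`;
line 3853): `In8M` over the ghost arena AFTER the call (`Ab` = the arena before it), both pointer fields still NULL
(`Built.fresh`: the allocator does not write the struct), and the allocator's result: `rax = NULL` (then the ghost is unchanged:
`Cur.alloc_fail_any`) or a block of `4·(SE+1)` bytes allocated since `Ab` (`Cur.alloc_call`). `esi = lea [rax*4+4]` with
`0 ≤ SE < 2^24`: no 32-bit wrap. -/
def At8M1 (u₀ : State) (g : Ghost) (i : Nat) (v : State) : Prop :=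
  ∃ A lengths values A2 A3 Ai Aw Ab,
    In8M u₀ g i A2 A3 Ai Aw Ab A lengths values L.start_decoder.cut138 v ∧
    Codebook.sorted_codewords v.mem (g.cb v.mem i) = 0 ∧
    Codebook.sorted_values v.mem (g.cb v.mem i) = 0 ∧
    (v.reg .rax = 0 ∨
      Since Ab A.1 ⟨(v.reg .rax).toNat, 4 * ((Codebook.sorted_entries v.mem (g.cb v.mem i)).toNat + 1)⟩)

/-- **`At8M2 i`, cut139 = 0x114a47** (`mov rbp, rax`: the second `setup_malloc(f, 4·(SE+1))` returned; exit of `C8b`, entry of `C8c`;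
line 3857): `sorted_codewords` is stored (0x114a13) and non-NULL (0x114a1d), a block of `4·(SE+1)` bytes allocated between `Ab` and
`Ac` (`Ac` = the arena between the two calls); `sorted_values` is still NULL; the second result: `rax = NULL` or a block allocated
since `Ac`. -/
def At8M2 (u₀ : State) (g : Ghost) (i : Nat) (v : State) : Prop :=
  ∃ A lengths values A2 A3 Ai Aw Ab Ac,
    In8M u₀ g i A2 A3 Ai Aw Ab A lengths values L.start_decoder.cut139 v ∧
    Ab.Extends Ac ∧ Ac.Extends A.1 ∧
    Since Ab Ac ⟨Codebook.sorted_codewords v.mem (g.cb v.mem i),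
      4 * ((Codebook.sorted_entries v.mem (g.cb v.mem i)).toNat + 1)⟩ ∧
    Codebook.sorted_values v.mem (g.cb v.mem i) = 0 ∧
    (v.reg .rax = 0 ∨
      Since Ac A.1 ⟨(v.reg .rax).toNat, 4 * ((Codebook.sorted_entries v.mem (g.cb v.mem i)).toNat + 1)⟩)

/-- **`At8M3 i`, cut140 = 0x114a8c** (`lea rdi, [r14+838H]`: the FIX 7 memset returned; exit of `C8c`, entry of `C8d`; line 3859):
both tables allocated — `sorted_codewords` between `Ab` and `Ac`, `sorted_values` since `Ac`, the pointer STILL AT THE BLOCK'S BASE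
(incremented at 0x114aa3) — and all `4·(SE+1)` bytes of the `sorted_values` block are 0 (memset's post: ZV for the words 1 … SE once
the pointer is incremented; the base word is overwritten by the sentinel −1 at 0x114aaf). rbp, rax are dead (0x114a98 reloads the
pointer from the struct). -/
def At8M3 (u₀ : State) (g : Ghost) (i : Nat) (v : State) : Prop :=
  ∃ A lengths values A2 A3 Ai Aw Ab Ac,
    In8M u₀ g i A2 A3 Ai Aw Ab A lengths values L.start_decoder.cut140 v ∧
    Ab.Extends Ac ∧ Ac.Extends A.1 ∧
    Since Ab Ac ⟨Codebook.sorted_codewords v.mem (g.cb v.mem i),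
      4 * ((Codebook.sorted_entries v.mem (g.cb v.mem i)).toNat + 1)⟩ ∧
    Since Ac A.1 ⟨Codebook.sorted_values v.mem (g.cb v.mem i),
      4 * ((Codebook.sorted_entries v.mem (g.cb v.mem i)).toNat + 1)⟩ ∧
    ZeroFill v.mem (Codebook.sorted_values v.mem (g.cb v.mem i))
      (4 * ((Codebook.sorted_entries v.mem (g.cb v.mem i)).toNat + 1))

/-- **The join 0x114710 = `L.start_decoder.at_114710`** (`lea rdi, [r14+1BH]`, line 3864 `if (c->sparse)`; reached from 0x11470a
not taken — `SE = 0`, `Ab = A.1`, K4 by `K4.null` from `Built.fresh`, K4c vacuous — and by the `jmp` 0x114ac4 after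
compute_sorted_huffman — the tables `.older` / `.mono` to `Since Ai A.1`, the sentinel outside the callee's footprint, K4c = its post
ZV): `Frame`, `Core8`, and K4, K4c in `AtC9`'s texts. What is left is the dispatch on `sparse`. rdi, rax, rbp are dead. -/
structure In8S (u₀ : State) (g : Ghost) (i : Nat) (A2 A3 Ai Aw Ab : Arena) (A : Arena × List Obj) (lengths values : Nat)
    (v : State) : Prop where
  /-- the common part at the join -/
  frame : Frame u₀ g L.start_decoder.at_114710 A v
  /-- the book under construction (temps, K3's blocks, rbx = lengths, r12 = values) -/
  core : Core8 g i A2 A3 Ai Aw Ab A lengths values v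
  /-- the sorted tables, allocated since `Ai` (or none for `SE = 0`) -/
  k4 : Codebook.K4 (Since Ai A.1) v.mem (g.cb v.mem i)
  /-- `∀ x < SE: 0 ≤ sorted_values[x] < E` -/
  k4c : Codebook.K4c v.mem (g.cb v.mem i)

/-- `At8S i`: `In8S` for some ghost arena, arrays and snapshots. -/
def At8S (u₀ : State) (g : Ghost) (i : Nat) (v : State) : Prop :=
  ∃ A lengths values A2 A3 Ai Aw Ab, In8S u₀ g i A2 A3 Ai Aw Ab A lengths values v

/-- **`At8F i`, cut144 = 0x114b24** (`mov rdi, rbp`: `setup_temp_free(f, values, 4·SE)` returned; exit of `C8e` for a sparse book,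
entry of `C8f`; line 3866): the clauses of `InC9` (K1, K2, K4, K4c, `Fresh3`) over the ghost arena AFTER the free, `sparse = 1`, the
final `codeword_lengths` block (K3s's first clause; the second, `codewords = NULL`, is stored at 0x114b72), the temp blocks still
outstanding [P2, P1], and the registers the rest reads: r15 = f (0x114b17; read 0x114b4a, 0x114b62), rbp = c + 840H (0x114af7; read
0x114b24), rbx = lengths (read 0x114b5f). r12 (= values, just freed) is dead: 0x114b33 overwrites it. -/
structure In8F (u₀ : State) (g : Ghost) (i : Nat) (A2 A3 Ai : Arena) (A : Arena × List Obj) (lengths : Nat) (v : State) :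
    Prop where
  /-- the common part at cut144 -/
  frame : Frame u₀ g L.start_decoder.cut144 A v
  cur : Cur g i A2 A3 Ai A v
  k1 : Codebook.K1 v.mem (g.cb v.mem i)
  k2 : Codebook.K2 v.mem (g.cb v.mem i)
  k4 : Codebook.K4 (Since Ai A.1) v.mem (g.cb v.mem i)
  k4c : Codebook.K4c v.mem (g.cb v.mem i)
  fresh : Fresh3 v.mem (g.cb v.mem i)
  /-- the arm of the frees is under `if (c->sparse)`; K2 makes it 1 -/
  sparse1 : Codebook.sparse v.mem (g.cb v.mem i) = 1
  /-- K3s, `codeword_lengths`: `SE` bytes, allocated since `Ai` -/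
  cl : Since Ai A.1 ⟨Codebook.codeword_lengths v.mem (g.cb v.mem i), (Codebook.sorted_entries v.mem (g.cb v.mem i)).toNat⟩
  /-- temps = [P2, P1]: `codewords` (4·SE bytes) on top, `lengths` (E bytes) below -/
  temps : TempsAre A.1
    [(Codebook.codewords v.mem (g.cb v.mem i), 4 * (Codebook.sorted_entries v.mem (g.cb v.mem i)).toNat),
     (lengths, (Codebook.entries v.mem (g.cb v.mem i)).toNat)]
  /-- r15 = f (callee-saved): the first argument of the two frees left -/
  r15 : v.reg .r15 = addr g.f
  /-- rbp = &c->sorted_entries (callee-saved): the argument of the check 0x114b27 -/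
  rbp : v.reg .rbp = addr (g.cb v.mem i + 0x840)
  /-- rbx = lengths (callee-saved): the second argument of the last free -/
  rbx : v.reg .rbx = addr lengths

/-- `At8F i`: `In8F` for some ghost arena, `lengths` array and snapshots. -/
def At8F (u₀ : State) (g : Ghost) (i : Nat) (v : State) : Prop :=
  ∃ A lengths A2 A3 Ai, In8F u₀ g i A2 A3 Ai A lengths v

/-- **Segment `start_decoder.C8a`** (0x1146f5–0x11470a + 0x1149f3–0x1149ff, lines 3851–3853; 8 instructions: the check of
`c->sorted_entries`, the test, `setup_malloc(f, 4·(SE+1))`): the join `At8S` when `SE = 0`, else the return of the allocator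
`At8M1` on both of its outcomes. -/
def SegC8a (Lay : Layout) (μ : Microarch) (u₀ : State) : Prop :=
  ∀ (g : Ghost) (i : Nat) (v : State), AtC8 u₀ g i v → ReachVia Lay μ WayInv v (fun w => At8S u₀ g i w ∨ At8M1 u₀ g i w)

/-- **Segment `start_decoder.C8b`** (0x114a04–0x114a42 + the stub 0x114ac9–0x114adb, lines 3853–3857; 17 instructions: the store of
`sorted_codewords`, its NULL test with `error(f, VORBIS_outofmem)`, the second `setup_malloc(f, 4·(SE+1))`). -/
def SegC8b (Lay : Layout) (μ : Microarch) (u₀ : State) : Prop :=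
  ∀ (g : Ghost) (i : Nat) (v : State), At8M1 u₀ g i v → ReachVia Lay μ WayInv v (fun w => At8M2 u₀ g i w ∨ AtERR u₀ g w)

/-- **Segment `start_decoder.C8c`** (0x114a47–0x114a87 + the stub 0x114ae0–0x114af2, lines 3857–3858; 20 instructions: the store of
`sorted_values`, its NULL test with `error(f, VORBIS_outofmem)`, the FIX 7 `memset(c->sorted_values, 0, 4·(SE+1))`). -/
def SegC8c (Lay : Layout) (μ : Microarch) (u₀ : State) : Prop :=
  ∀ (g : Ghost) (i : Nat) (v : State), At8M2 u₀ g i v → ReachVia Lay μ WayInv v (fun w => At8M3 u₀ g i w ∨ AtERR u₀ g w)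

/-- **Segment `start_decoder.C8d`** (0x114a8c–0x114ac4, lines 3859–3861; 12 instructions: `++c->sorted_values`,
`c->sorted_values[-1] = -1`, `compute_sorted_huffman(c, lengths, values)`, the `jmp` to the join). -/
def SegC8d (Lay : Layout) (μ : Microarch) (u₀ : State) : Prop :=
  ∀ (g : Ghost) (i : Nat) (v : State), At8M3 u₀ g i v → ReachVia Lay μ WayInv v (fun w => At8S u₀ g i w)

/-- **Segment `start_decoder.C8e`** (0x114710–0x11471e + 0x114af7–0x114b1f, lines 3864–3865; 13 instructions: the check and test of
`c->sparse`; a dense book is at `AtC9`; a sparse one frees P3 = `values`). -/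
def SegC8e (Lay : Layout) (μ : Microarch) (u₀ : State) : Prop :=
  ∀ (g : Ghost) (i : Nat) (v : State), At8S u₀ g i v → ReachVia Lay μ WayInv v (fun w => AtC9 u₀ g i w ∨ At8F u₀ g i w)

/-- **Segment `start_decoder.C8f`** (0x114b24–0x114b7a, lines 3866–3868; 20 instructions: the frees of P2 = `c->codewords` and
P1 = `lengths`, `c->codewords = NULL`, the `jmp` to `AtC9`). -/
def SegC8f (Lay : Layout) (μ : Microarch) (u₀ : State) : Prop :=
  ∀ (g : Ghost) (i : Nat) (v : State), At8F u₀ g i v → ReachVia Lay μ WayInv v (fun w => AtC9 u₀ g i w)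

namespace C8

/-- **From the join to the exits of C8**: C8e reaches `AtC9` (a dense book) or `At8F`, from where C8f reaches `AtC9`. -/
theorem from_join {Lay : Layout} {μ : Microarch} {u₀ : State} (he : SegC8e Lay μ u₀) (hf : SegC8f Lay μ u₀)
    (g : Ghost) (i : Nat) (w : State) (hw : At8S u₀ g i w) :
    ReachVia Lay μ WayInv w (fun x => AtC9 u₀ g i x ∨ AtERR u₀ g x) := by
  refine (he g i w hw).trans ?_
  intro x hx
  rcases hx with h9 | hF
  · exact ReachVia.done (Or.inl h9)
  · refine (hf g i x hF).mono ?_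
    intro y hy
    exact Or.inl hy

/-- **From the return of the memset to the exits of C8**: C8d reaches the join. -/
theorem from_memset {Lay : Layout} {μ : Microarch} {u₀ : State} (hd : SegC8d Lay μ u₀) (he : SegC8e Lay μ u₀)
    (hf : SegC8f Lay μ u₀) (g : Ghost) (i : Nat) (w : State) (hw : At8M3 u₀ g i w) :
    ReachVia Lay μ WayInv w (fun x => AtC9 u₀ g i x ∨ AtERR u₀ g x) := by
  refine (hd g i w hw).trans ?_
  intro x hx
  exact from_join he hf g i x hx

/-- **From the return of the second setup_malloc to the exits of C8**: C8c reaches the return of the memset or `AtERR`. -/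
theorem from_malloc2 {Lay : Layout} {μ : Microarch} {u₀ : State} (hc : SegC8c Lay μ u₀) (hd : SegC8d Lay μ u₀)
    (he : SegC8e Lay μ u₀) (hf : SegC8f Lay μ u₀) (g : Ghost) (i : Nat) (w : State) (hw : At8M2 u₀ g i w) :
    ReachVia Lay μ WayInv w (fun x => AtC9 u₀ g i x ∨ AtERR u₀ g x) := by
  refine (hc g i w hw).trans ?_
  intro x hx
  rcases hx with h3 | hE
  · exact from_memset hd he hf g i x h3
  · exact ReachVia.done (Or.inr hE)

/-- **From the return of the first setup_malloc to the exits of C8**: C8b reaches the return of the second one or `AtERR`. -/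
theorem from_malloc1 {Lay : Layout} {μ : Microarch} {u₀ : State} (hb : SegC8b Lay μ u₀) (hc : SegC8c Lay μ u₀)
    (hd : SegC8d Lay μ u₀) (he : SegC8e Lay μ u₀) (hf : SegC8f Lay μ u₀) (g : Ghost) (i : Nat) (w : State)
    (hw : At8M1 u₀ g i w) : ReachVia Lay μ WayInv w (fun x => AtC9 u₀ g i x ∨ AtERR u₀ g x) := by
  refine (hb g i w hw).trans ?_
  intro x hx
  rcases hx with h2 | hE
  · exact from_malloc2 hc hd he hf g i x h2
  · exact ReachVia.done (Or.inr hE)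

end C8

/-- **Segment C8 from its six parts**: C8a reaches the join (no sorted tables) or the return of the first setup_malloc; from there
C8b, C8c, C8d lead to the join or to `AtERR`; from the join C8e, C8f lead to `AtC9`. No loop. -/
theorem SegC8.of_parts {Lay : Layout} {μ : Microarch} {u₀ : State} (ha : SegC8a Lay μ u₀) (hb : SegC8b Lay μ u₀)
    (hc : SegC8c Lay μ u₀) (hd : SegC8d Lay μ u₀) (he : SegC8e Lay μ u₀) (hf : SegC8f Lay μ u₀) : SegC8 Lay μ u₀ := by
  intro g i v hat
  refine (ha g i v hat).trans ?_
  intro w hw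
  rcases hw with hS | hM
  · exact C8.from_join he hf g i w hS
  · exact C8.from_malloc1 hb hc hd he hf g i w hM

end Vorbis.Spec.StartDecoder
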